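-- pv_equiv track=rewrite | github.com/provide-io/ci-tooling | src/provide/cicd/conform.py | _clean_header_lines
-- ===== SOURCE A (Python) =====
-- def _clean_header_lines(lines: list[str]) -> list[str]:
--     """Remove shebang, SPDX headers, and placeholder docstrings from lines.
--
--     Args:
--         lines: List of file lines with newlines
--
--     Returns:
--         Cleaned lines without headers
--     """
--     cleaned_lines = []
--     skip_next_empty = False
--
--     for _i, line in enumerate(lines):
--         stripped = line.strip()
--
--         # Skip shebang
--         if stripped.startswith("#!"):
--             skip_next_empty = True
--             continue
--
--         # Skip SPDX header lines
--         if stripped.startswith("# SPDX-") or stripped == "#":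
--             skip_next_empty = True
--             continue
--
--         # Skip placeholder docstring if found
--         if stripped == '"""TODO: Add module docstring."""':
--             skip_next_empty = True
--             continue
--
--         # Skip one empty line after headers
--         if skip_next_empty and stripped == "":
--             skip_next_empty = False
--             continue
--
--         skip_next_empty = False
--         cleaned_lines.append(line)
--
--     return cleaned_lines
-- ===== SOURCE B (Python) =====
-- def _clean_header_lines(lines: list[str]) -> list[str]:
--     """Remove shebang, SPDX headers, and placeholder docstrings from lines."""
--
--     def _is_header(line: str) -> bool:
--         s = line.strip()
--         return (
--             s.startswith("#!")
--             or s.startswith("# SPDX-")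
--             or s == "#"
--             or s == '"""TODO: Add module docstring."""'
--         )
--
--     # Stateless: a line is dropped iff it is a header, or it is blank and the
--     # line immediately before it is a header (A's flag is true exactly then).
--     return [
--         cur
--         for prev, cur in zip([None] + lines, lines)
--         if not _is_header(cur)
--         and not (cur.strip() == "" and prev is not None and _is_header(prev))
--     ]
-- ===== Notes on version B (the rewrite author's own statement) =====
-- stated objective: alternative
-- what changed: Replaced the stateful flag loop by a stateless filter over (predecessor, line) pairs: a line is dropped iff it is a header or it is blank with a header as its immediate predecessor.
import Mathlib
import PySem

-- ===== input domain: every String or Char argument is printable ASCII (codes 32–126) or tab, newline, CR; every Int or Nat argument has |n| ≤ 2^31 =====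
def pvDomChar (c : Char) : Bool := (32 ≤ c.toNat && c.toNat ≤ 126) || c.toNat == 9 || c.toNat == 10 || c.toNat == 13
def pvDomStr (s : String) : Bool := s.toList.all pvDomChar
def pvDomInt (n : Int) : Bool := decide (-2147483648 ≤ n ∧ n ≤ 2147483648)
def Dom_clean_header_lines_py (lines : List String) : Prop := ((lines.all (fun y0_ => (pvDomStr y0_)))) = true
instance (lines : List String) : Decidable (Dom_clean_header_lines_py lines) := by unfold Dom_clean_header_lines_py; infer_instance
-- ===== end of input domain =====

-- B replaces A's stateful skip_next_empty loop by a stateless filter over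
-- (predecessor, line) pairs (objective: alternative decomposition).

-- ===== PORT A =====
-- A's loop body: state = (cleaned_lines, skip_next_empty), branches in A's order
def pvAStep (st : List String × Bool) (line : String) : List String × Bool :=
  let stripped := PySem.Str.strip line
  if PySem.Str.startswith stripped "#!" then (st.1, true)
  else if PySem.Str.startswith stripped "# SPDX-" || stripped == "#" then (st.1, true)
  else if stripped == "\"\"\"TODO: Add module docstring.\"\"\"" then (st.1, true)
  else if st.2 && stripped == "" then (st.1, false)
  else (st.1 ++ [line], false)

def clean_header_lines_py (lines : List String) : List String :=
  (lines.foldl pvAStep ([], false)).1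

-- ===== PORT B =====
-- B's helper _is_header
def pvIsHeader (line : String) : Bool :=
  let s := PySem.Str.strip line
  PySem.Str.startswith s "#!" || PySem.Str.startswith s "# SPDX-" || s == "#"
    || s == "\"\"\"TODO: Add module docstring.\"\"\""

-- the comprehension's condition on a (prev, cur) pair
def pvKeep (prev : Option String) (cur : String) : Bool :=
  !(pvIsHeader cur)
    && !((PySem.Str.strip cur == "")
          && (match prev with | some q => pvIsHeader q | none => false))

-- B: filter lines zipped with their predecessors ([None] + lines)
def clean_header_lines_py_alt (lines : List String) : List String :=
  ((List.zip ((none : Option String) :: lines.map some) lines).filter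
      (fun pc => pvKeep pc.1 pc.2)).map Prod.snd

-- ===== PRECONDITION & SPEC =====
def Spec_clean_header_lines_py (lines : List String) (out : List String) : Prop := out = clean_header_lines_py_alt lines
instance (lines : List String) (out : List String) : Decidable (Spec_clean_header_lines_py lines out) := by unfold Spec_clean_header_lines_py; infer_instance

-- ===== CLAIM (what is proved, stated in full; the proofs are below) =====
def Claim_equal_clean_header_lines_py : Prop := ∀ (lines : List String), Dom_clean_header_lines_py lines → Spec_clean_header_lines_py lines (clean_header_lines_py lines)

-- ===== LEMMAS AND PROOFS =====

-- A's loop as a flag-indexed recursion (proof-side characterisation of the fold)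
def pvAGo (b : Bool) : List String → List String
  | [] => []
  | l :: ls =>
    if pvIsHeader l then pvAGo true ls
    else if b && (PySem.Str.strip l == "") then pvAGo false ls
    else l :: pvAGo false ls

def pvFlag : Option String → Bool
  | none => false
  | some q => pvIsHeader q

theorem pvAStep_eq (acc : List String) (b : Bool) (l : String) :
    pvAStep (acc, b) l =
      if pvIsHeader l then (acc, true)
      else if b && (PySem.Str.strip l == "") then (acc, false)
      else (acc ++ [l], false) := by
  simp only [pvAStep, pvIsHeader]
  by_cases h1 : PySem.Str.startswith (PySem.Str.strip l) "#!" = true <;>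
    by_cases h2 : PySem.Str.startswith (PySem.Str.strip l) "# SPDX-" = true <;>
    by_cases h3 : (PySem.Str.strip l == "#") = true <;>
      by_cases h4 : (PySem.Str.strip l == "\"\"\"TODO: Add module docstring.\"\"\"") = true <;>
      cases b <;> simp_all

theorem pvA_foldl (lines : List String) (acc : List String) (b : Bool) :
    (lines.foldl pvAStep (acc, b)).1 = acc ++ pvAGo b lines := by
  induction lines generalizing acc b with
  | nil => simp [pvAGo]
  | cons l ls ih =>
    rw [List.foldl_cons, pvAStep_eq]
    by_cases hh : pvIsHeader l = true
    · rw [if_pos hh, ih]; simp [pvAGo, hh]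
    · rw [if_neg hh]
      by_cases hb : (b && (PySem.Str.strip l == "")) = true
      · rw [if_pos hb, ih]; simp [pvAGo, hh, hb]
      · rw [if_neg hb, ih]; simp [pvAGo, hh, hb]

-- B's zip-filter, generalised over the first predecessor, equals A's flag recursion
theorem pvB_eq_pvAGo (ls : List String) (p : Option String) :
    ((List.zip (p :: ls.map some) ls).filter (fun pc => pvKeep pc.1 pc.2)).map Prod.snd
      = pvAGo (pvFlag p) ls := by
  induction ls generalizing p with
  | nil => simp [pvAGo]
  | cons l ls ih =>
    have hz : List.zip (p :: (l :: ls).map some) (l :: ls)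
        = (p, l) :: List.zip (some l :: ls.map some) ls := by simp [List.zip]
    rw [hz, List.filter_cons]
    have hfl : pvFlag (some l) = pvIsHeader l := rfl
    have hkeq : pvKeep p l
        = (!pvIsHeader l && !((PySem.Str.strip l == "") && pvFlag p)) := by
      cases p <;> rfl
    by_cases hh : pvIsHeader l = true
    · have hk : pvKeep p l = false := by simp [pvKeep, hh]
      simp only [hk, Bool.false_eq_true, if_false]
      rw [ih (some l), hfl, hh]
      simp only [pvAGo, hh, if_true]
    · have hh' : pvIsHeader l = false := by simp_all
      by_cases hb : (PySem.Str.strip l == "" && pvFlag p) = true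
      · have hk : pvKeep p l = false := by rw [hkeq, hb]; simp
        simp only [hk, Bool.false_eq_true, if_false]
        rw [ih (some l), hfl, hh']
        have hb' : (pvFlag p && (PySem.Str.strip l == "")) = true := by
          rw [Bool.and_comm]; exact hb
        simp only [pvAGo, hh', Bool.false_eq_true, if_false, hb', if_true]
      · have hk : pvKeep p l = true := by
          rw [hkeq, hh']
          simp only [Bool.not_eq_true] at hb
          rw [hb]; simp
        simp only [hk, if_true, List.map_cons]
        rw [ih (some l), hfl, hh']
        have hb' : (pvFlag p && (PySem.Str.strip l == "")) = false := by
          rw [Bool.and_comm]; simp_all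
        simp only [pvAGo, hh', Bool.false_eq_true, if_false, hb']

-- ===== VERDICT (by name: the statement is the Claim_ definition above) =====
theorem clean_header_lines_py_spec : Claim_equal_clean_header_lines_py := by
  intro lines _
  unfold Spec_clean_header_lines_py clean_header_lines_py clean_header_lines_py_alt
  rw [pvA_foldl lines [] false, List.nil_append, pvB_eq_pvAGo lines none]
  rfl
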